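-- pv_equiv track=rewrite | github.com/alexeyismirnov/holytext | utils.py | extract_command_and_text
-- ===== SOURCE A (Python) =====
-- from typing import Dict, List, Optional, Tuple
-- from typing import Dict, List, Optional, Tuple
--
-- def extract_command_and_text(user_message: str, command_prefix: str) -> Tuple[str, str]:
--     """
--     Extract the command and the text to process, considering variations in command format.
--     Looks for punctuation marks that might separate the command from the text.
--
--     Args:
--         user_message: The full user message
--         command_prefix: The basic command prefix to look for (e.g., "translate", "annotate")
--
--     Returns:
--         Tuple of (command_part, text_to_process)
--     """
--     # Check if the message starts with the command prefix
--     if not user_message.lower().startswith(command_prefix.lower()):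
--         return "", user_message
--
--     # Find the first punctuation mark after the command prefix
--     # Common separators: ":", ".", ",", "-", ";"
--     command_part = user_message
--     text_to_process = ""
--
--     # Look for punctuation marks that might separate command from text
--     separators = [":", ".", ",", "-", ";", "\n"]
--     min_pos = len(user_message)
--
--     for sep in separators:
--         pos = user_message.find(sep, len(command_prefix))
--         if pos > 0 and pos < min_pos:
--             min_pos = pos
--             command_part = user_message[:min_pos + 1]  # Include the separator
--             text_to_process = user_message[min_pos + 1:].strip()
--
--     # If no separator found, assume the command is just the prefix
--     # and everything after is the text
--     if text_to_process == "":
--         command_part = command_prefix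
--         text_to_process = user_message[len(command_prefix):].strip()
--
--     return command_part, text_to_process
-- ===== SOURCE B (Python) =====
-- def extract_command_and_text(user_message: str, command_prefix: str):
--     """Single left-to-right scan for the first separator after the prefix,
--     instead of one find() pass per separator character."""
--     if not user_message.lower().startswith(command_prefix.lower()):
--         return "", user_message
--
--     command_part = user_message
--     text_to_process = ""
--     for i in range(len(command_prefix), len(user_message)):
--         if i > 0 and user_message[i] in ":.,-;\n":
--             command_part = user_message[:i + 1]
--             text_to_process = user_message[i + 1:].strip()
--             break
--
--     if text_to_process == "":
--         command_part = command_prefix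
--         text_to_process = user_message[len(command_prefix):].strip()
--
--     return command_part, text_to_process
-- ===== Notes on version B (the rewrite author's own statement) =====
-- stated objective: alternative
-- what changed: replaces the six repeated str.find passes (one per separator, with min-position bookkeeping) by a single left-to-right scan that stops at the first separator character after the prefix
-- intended difference: When command_prefix is empty and the first separator found after index 0 is the same character as user_message[0] (with non-whitespace text after it), A's pos>0 guard discards that character's find() result entirely and so misses the split (falling back or splitting at a later different separator), while B splits at that first separator, which is the intended 'exclude only index 0' behaviour. — e.g. on extract_command_and_text(".a.b", ""): A returns ("", ".a.b"), B returns (".a.", "b")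
import Mathlib
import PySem

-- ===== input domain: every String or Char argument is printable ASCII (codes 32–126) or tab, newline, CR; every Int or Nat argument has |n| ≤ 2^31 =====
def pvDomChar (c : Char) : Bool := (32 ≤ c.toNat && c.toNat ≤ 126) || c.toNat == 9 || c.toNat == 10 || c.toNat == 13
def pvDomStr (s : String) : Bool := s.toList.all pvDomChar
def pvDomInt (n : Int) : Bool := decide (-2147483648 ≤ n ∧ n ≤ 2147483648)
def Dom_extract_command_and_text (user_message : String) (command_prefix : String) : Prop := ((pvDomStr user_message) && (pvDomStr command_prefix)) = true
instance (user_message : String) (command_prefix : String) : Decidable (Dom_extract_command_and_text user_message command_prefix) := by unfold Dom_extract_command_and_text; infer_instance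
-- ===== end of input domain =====

-- B replaces A's six repeated str.find passes (one per separator, with min-position
-- bookkeeping) by one left-to-right scan stopping at the first separator after the prefix;
-- on empty command_prefix A's pos>0 guard can skip a separator character entirely — B
-- splits at the first separator after index 0 there (see D_ below).

-- ===== PORT A =====
def extract_command_and_text (user_message : String) (command_prefix : String) : String × String :=
  let u := user_message.toList
  let p := command_prefix.toList
  if ¬ (PySem.Chars.startswith (PySem.Chars.lower u) (PySem.Chars.lower p)) then
    ("", user_message)
  else
    let seps : List (List Char) := [[':'], ['.'], [','], ['-'], [';'], ['\n']]
    let st :=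
      seps.foldl
        (fun (st : Int × List Char × List Char) sep =>
          let pos := PySem.Chars.findFrom u sep ((p.length : Int))
          if 0 < pos ∧ pos < st.1 then
            (pos, PySem.Chars.slice u none (some (pos + 1)),
             PySem.Chars.strip (PySem.Chars.slice u (some (pos + 1)) none))
          else st)
        (((u.length : Int)), u, ([] : List Char))
    if st.2.2 = [] then
      (command_prefix,
       String.ofList (PySem.Chars.strip (PySem.Chars.slice u (some ((p.length : Int))) none)))
    else (String.ofList st.2.1, String.ofList st.2.2)

-- ===== PORT B =====
def pvIsSep (c : Char) : Bool := [':', '.', ',', '-', ';', '\n'].contains c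

def pvScanSep : List Char → Nat → Option Nat
  | [], _ => none
  | c :: rest, i => if 0 < i ∧ pvIsSep c then some i else pvScanSep rest (i + 1)

def extract_command_and_text_alt (user_message : String) (command_prefix : String) : String × String :=
  let u := user_message.toList
  let p := command_prefix.toList
  if ¬ (PySem.Chars.startswith (PySem.Chars.lower u) (PySem.Chars.lower p)) then
    ("", user_message)
  else
    let res : List Char × List Char :=
      match pvScanSep (u.drop p.length) p.length with
      | some i => (u.take (i + 1), PySem.Chars.strip (u.drop (i + 1)))
      | none => (u, [])
    if res.2 = [] then
      (command_prefix, String.ofList (PySem.Chars.strip (u.drop p.length)))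
    else (String.ofList res.1, String.ofList res.2)

-- ===== PRECONDITION & SPEC =====
-- When command_prefix is empty and the first separator after index 0 is the same character
-- as user_message[0] (with non-whitespace text after it), A's pos>0 guard discards that
-- character's find() result entirely and misses the split (falling back, or splitting at a
-- later, different separator), while B splits at that first separator — the intended
-- 'exclude only index 0' behaviour.
def pvSepChars : List Char := ":.,-;\n".toList

def D_extract_command_and_text (user_message : String) (command_prefix : String) : Prop :=
  command_prefix.toList = [] ∧
  user_message.toList.tail.any (pvSepChars.contains ·) = true ∧
  user_message.toList.getD (1 + user_message.toList.tail.findIdx (pvSepChars.contains ·)) ' '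
    = user_message.toList.getD 0 ' ' ∧
  (user_message.toList.drop (2 + user_message.toList.tail.findIdx (pvSepChars.contains ·))).all
    PySem.Chars.isspace = false
instance (user_message : String) (command_prefix : String) : Decidable (D_extract_command_and_text user_message command_prefix) := by unfold D_extract_command_and_text; infer_instance

def Spec_extract_command_and_text (user_message : String) (command_prefix : String) (out : String × String) : Prop := ¬ D_extract_command_and_text user_message command_prefix → out = extract_command_and_text_alt user_message command_prefix
instance (user_message : String) (command_prefix : String) (out : String × String) : Decidable (Spec_extract_command_and_text user_message command_prefix out) := by unfold Spec_extract_command_and_text; infer_instance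

def pvDiffWitness_extract_command_and_text : String × String := (".a.b", "")
def pvDiffWitnessOut_extract_command_and_text : (String × String) × (String × String) :=
  (("", ".a.b"), (".a.", "b"))

-- ===== CLAIM (what is proved, stated in full; the proofs are below) =====
def Claim_unchanged_extract_command_and_text : Prop := ∀ (user_message : String) (command_prefix : String), Dom_extract_command_and_text user_message command_prefix → Spec_extract_command_and_text user_message command_prefix (extract_command_and_text user_message command_prefix)
def Claim_changed_extract_command_and_text : Prop := Dom_extract_command_and_text (pvDiffWitness_extract_command_and_text.1) (pvDiffWitness_extract_command_and_text.2) ∧ D_extract_command_and_text (pvDiffWitness_extract_command_and_text.1) (pvDiffWitness_extract_command_and_text.2) ∧ extract_command_and_text (pvDiffWitness_extract_command_and_text.1) (pvDiffWitness_extract_command_and_text.2) = pvDiffWitnessOut_extract_command_and_text.1 ∧ extract_command_and_text_alt (pvDiffWitness_extract_command_and_text.1) (pvDiffWitness_extract_command_and_text.2) = pvDiffWitnessOut_extract_command_and_text.2 ∧ pvDiffWitnessOut_extract_command_and_text.1 ≠ pvDiffWitnessOut_extract_command_and_text.2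
def Claim_exact_extract_command_and_text : Prop := ∀ (user_message : String) (command_prefix : String), Dom_extract_command_and_text user_message command_prefix → D_extract_command_and_text user_message command_prefix → extract_command_and_text user_message command_prefix ≠ extract_command_and_text_alt user_message command_prefix

-- ===== LEMMAS AND PROOFS =====

-- the (min_pos, command_part, text) triple A's loop maintains, as a function of min_pos
def pvPack (u : List Char) (m : Int) : List Char × List Char :=
  if m = (u.length : Int) then (u, ([] : List Char))
  else (PySem.Chars.slice u none (some (m + 1)),
        PySem.Chars.strip (PySem.Chars.slice u (some (m + 1)) none))

-- the scalar min_pos fold underlying A's loop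
def pvM (u : List Char) (k : Int) (S : List (List Char)) (m : Int) : Int :=
  S.foldl (fun m sep =>
    let pos := PySem.Chars.findFrom u sep k
    if 0 < pos ∧ pos < m then pos else m) m

theorem pvM_le (u : List Char) (k : Int) (S : List (List Char)) (m : Int) :
    pvM u k S m ≤ m := by
  induction S generalizing m with
  | nil => simp [pvM]
  | cons s S ih =>
    simp only [pvM, List.foldl_cons] at *
    split_ifs with h
    · exact le_trans (ih _) (le_of_lt h.2)
    · exact ih m

theorem pvM_cases (u : List Char) (k : Int) (S : List (List Char)) (m : Int) :
    pvM u k S m = m ∨ ∃ sep ∈ S, pvM u k S m = PySem.Chars.findFrom u sep k ∧ 0 < pvM u k S m := by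
  induction S generalizing m with
  | nil => left; simp [pvM]
  | cons s S ih =>
    simp only [pvM, List.foldl_cons] at *
    split_ifs with h
    · rcases ih (PySem.Chars.findFrom u s k) with h1 | ⟨sep, hs, h1, h2⟩
      · right; exact ⟨s, by simp, h1, by rw [h1]; exact h.1⟩
      · right; exact ⟨sep, by simp [hs], h1, h2⟩
    · rcases ih m with h1 | ⟨sep, hs, h1, h2⟩
      · left; exact h1
      · right; exact ⟨sep, by simp [hs], h1, h2⟩

theorem pvM_le_pos (u : List Char) (k : Int) (S : List (List Char)) (m : Int)
    (sep : List Char) (hsep : sep ∈ S) (hpos : 0 < PySem.Chars.findFrom u sep k) :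
    pvM u k S m ≤ PySem.Chars.findFrom u sep k := by
  induction S generalizing m with
  | nil => simp at hsep
  | cons s S ih =>
    simp only [pvM, List.foldl_cons] at *
    rcases List.mem_cons.mp hsep with rfl | hsep'
    · split_ifs with h
      · exact pvM_le u k S _
      · rw [not_and, not_lt] at h
        exact le_trans (pvM_le u k S m) (h hpos)
    · split_ifs with h
      · exact ih _ hsep'
      · exact ih _ hsep'

theorem pvFold_pack (u : List Char) (k : Int) (S : List (List Char)) (m : Int)
    (hm : m ≤ (u.length : Int)) :
    S.foldl
      (fun (st : Int × List Char × List Char) sep =>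
        let pos := PySem.Chars.findFrom u sep k
        if 0 < pos ∧ pos < st.1 then
          (pos, PySem.Chars.slice u none (some (pos + 1)),
           PySem.Chars.strip (PySem.Chars.slice u (some (pos + 1)) none))
        else st)
      (m, pvPack u m)
    = (pvM u k S m, pvPack u (pvM u k S m)) := by
  induction S generalizing m with
  | nil => simp [pvM]
  | cons s S ih =>
    simp only [List.foldl_cons, pvM] at *
    split_ifs with h
    · rw [← ih (PySem.Chars.findFrom u s k) (le_trans (le_of_lt h.2) hm)]
      congr 1
      have hne : PySem.Chars.findFrom u s k ≠ (u.length : Int) := by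
        intro he; rw [he] at h; omega
      simp [pvPack, hne]
    · exact ih m hm

-- single-character find: Chars.find.go on [c] is findIdx? (· == c)
theorem pvFindGo_single (c : Char) (l : List Char) : ∀ (k : Nat),
    PySem.Chars.find.go [c] l k =
      (match l.findIdx? (· == c) with
       | none => -1
       | some j => ((k + j : Nat) : Int)) := by
  induction l with
  | nil => intro k; simp [PySem.Chars.find.go]
  | cons h t ih =>
    intro k
    rw [PySem.Chars.find.go]
    by_cases hc : h = c
    · simp [List.isPrefixOf, hc, List.findIdx?_cons]
    · have h1 : (h == c) = false := beq_eq_false_iff_ne.mpr hc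
      have h2 : (c == h) = false := beq_eq_false_iff_ne.mpr (fun he => hc he.symm)
      rw [show ([c].isPrefixOf (h :: t)) = false by simp [List.isPrefixOf, h2]]
      simp only [List.findIdx?_cons, h1, Bool.false_eq_true, if_false]
      rw [ih (k + 1)]
      cases hfi : t.findIdx? (· == c) <;> simp
      ring

theorem pvPos_char (u : List Char) (k : Nat) (hk : k ≤ u.length) (c : Char) :
    PySem.Chars.findFrom u [c] (k : Int) =
      (match (u.drop k).findIdx? (· == c) with
       | none => -1
       | some j => ((k + j : Nat) : Int)) := by
  rw [PySem.Chars.findFrom_natCast u [c] k hk]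
  have : PySem.Chars.find (u.drop k) [c] =
      (match (u.drop k).findIdx? (· == c) with
       | none => -1
       | some j => ((j : Nat) : Int)) := by
    rw [show PySem.Chars.find (u.drop k) [c] = PySem.Chars.find.go [c] (u.drop k) 0 from rfl]
    rw [pvFindGo_single]
    cases hfi : (u.drop k).findIdx? (· == c) <;> simp
  rw [this]
  cases hfi : (u.drop k).findIdx? (· == c) <;> simp

-- scan lemmas
theorem pvScanSep_none (l : List Char) : ∀ (i : Nat), pvScanSep l i = none →
    ∀ j, (hj : j < l.length) → 0 < i + j → pvIsSep l[j] = false := by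
  induction l with
  | nil => intro i _ j hj; simp at hj
  | cons c rest ih =>
    intro i h j hj hpos
    rw [pvScanSep] at h
    split_ifs at h with hc
    cases j with
    | zero =>
      simp only [List.getElem_cons_zero]
      by_contra hsep
      exact hc ⟨by omega, by simpa using hsep⟩
    | succ j' =>
      have := ih (i + 1) h j' (by simpa using hj) (by omega)
      simpa using this

theorem pvScanSep_some (l : List Char) : ∀ (i r : Nat), pvScanSep l i = some r →
    ∃ j, ∃ hj : j < l.length, r = i + j ∧ 0 < r ∧ pvIsSep l[j] = true ∧
      ∀ j', (hj' : j' < l.length) → j' < j → 0 < i + j' → pvIsSep l[j'] = false := by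
  induction l with
  | nil => intro i r h; simp [pvScanSep] at h
  | cons c rest ih =>
    intro i r h
    rw [pvScanSep] at h
    split_ifs at h with hc
    · obtain rfl : i = r := by simpa using h
      exact ⟨0, by simp, by omega, hc.1, by simpa using hc.2, by omega⟩
    · obtain ⟨j, hj, hr, hpos, hsep, hmin⟩ := ih (i + 1) r h
      refine ⟨j + 1, by simpa using hj, by omega, hpos, by simpa using hsep, ?_⟩
      intro j' hj' hlt hp
      cases j' with
      | zero =>
        simp only [List.getElem_cons_zero]
        by_contra hs
        exact hc ⟨by omega, by simpa using hs⟩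
      | succ j'' =>
        have := hmin j'' (by simpa using hj') (by omega) (by omega)
        simpa using this

theorem pvScanSep_complete (l : List Char) : ∀ (i j : Nat), (hj : j < l.length) →
    0 < i + j → pvIsSep l[j] = true →
    (∀ j', (hj' : j' < l.length) → j' < j → 0 < i + j' → pvIsSep l[j'] = false) →
    pvScanSep l i = some (i + j) := by
  induction l with
  | nil => intro i j hj; simp at hj
  | cons c rest ih =>
    intro i j hj hpos hsep hmin
    rw [pvScanSep]
    cases j with
    | zero =>
      rw [if_pos ⟨by omega, by simpa using hsep⟩]; simp
    | succ j' =>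
      rw [if_neg]
      · have := ih (i + 1) j' (by simpa using hj) (by omega) (by simpa using hsep)
          (fun j'' hj'' hlt hp => by
            have := hmin (j'' + 1) (by simpa using hj'') (by omega) (by omega)
            simpa using this)
        rw [this]; congr 1; omega
      · rintro ⟨hi, hc⟩
        have := hmin 0 (by simp) (by omega) (by omega)
        simp at this
        exact absurd hc (by simp [this])

theorem pvStrip_eq_nil_iff (l : List Char) :
    PySem.Chars.strip l = [] ↔ ∀ c ∈ l, PySem.Chars.isspace c = true := by
  simp only [PySem.Chars.strip, PySem.Chars.rstrip, PySem.Chars.lstrip,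
    List.reverse_eq_nil_iff, List.dropWhile_eq_nil_iff, List.mem_reverse]
  constructor
  · intro h c hc
    rcases (by rw [← List.mem_append, List.takeWhile_append_dropWhile]; exact hc :
        c ∈ l.takeWhile PySem.Chars.isspace ∨ c ∈ l.dropWhile PySem.Chars.isspace) with h1 | h1
    · exact List.mem_takeWhile_imp h1
    · exact h c h1
  · intro h c hc
    exact h c ((List.dropWhile_sublist _).mem hc)

def pvSeps : List (List Char) := [[':'], ['.'], [','], ['-'], [';'], ['\n']]

theorem pvSeps_mem {sep : List Char} (h : sep ∈ pvSeps) : ∃ c, sep = [c] ∧ pvIsSep c = true := by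
  simp only [pvSeps, List.mem_cons, List.not_mem_nil, or_false] at h
  rcases h with rfl | rfl | rfl | rfl | rfl | rfl <;> exact ⟨_, rfl, by decide⟩

theorem pvSeps_of_isSep {c : Char} (h : pvIsSep c = true) : [c] ∈ pvSeps := by
  simp only [pvIsSep, List.contains_iff_mem, List.mem_cons, List.not_mem_nil, or_false] at h
  rcases h with rfl | rfl | rfl | rfl | rfl | rfl <;> simp [pvSeps]

theorem pvGetElem_idx (u : List Char) (a b : Nat) (hab : a = b) (ha : a < u.length) :
    u[a]'ha = u[b]'(hab ▸ ha) := by subst hab; rfl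

theorem pvIsSep_iff_mem (c : Char) : pvIsSep c = true ↔ c ∈ pvSepChars := by
  rw [show pvSepChars = [':', '.', ',', '-', ';', '\n'] from by decide]
  simp [pvIsSep]

-- the compact D_ unpacked into the explicit first-separator form the proofs use
theorem pvD_iff (um cp : String) : D_extract_command_and_text um cp ↔
    (cp.toList = [] ∧ ∃ i ∈ List.range um.toList.length, 0 < i ∧
      um.toList.getD i ' ' ∈ pvSepChars ∧
      (∀ j < i, 0 < j → um.toList.getD j ' ' ∉ pvSepChars) ∧
      um.toList.getD i ' ' = um.toList.getD 0 ' ' ∧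
      (um.toList.drop (i + 1)).all PySem.Chars.isspace = false) := by
  unfold D_extract_command_and_text
  set l := um.toList with hl
  constructor
  · rintro ⟨h1, hany, heq, hnws⟩
    set f := l.tail.findIdx (pvSepChars.contains ·) with hfdef
    have hfl : f < l.tail.length := List.findIdx_lt_length.mpr (List.any_eq_true.mp hany)
    have htl : l.tail.length = l.length - 1 := List.length_tail ..
    have hflen : 1 + f < l.length := by omega
    refine ⟨h1, 1 + f, List.mem_range.mpr hflen, by omega, ?_, ?_, heq,
      by rw [show (1 + f) + 1 = 2 + f by omega]; exact hnws⟩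
    · rw [List.getD_eq_getElem _ _ hflen]
      rw [← pvGetElem_idx l (f + 1) (1 + f) (by omega) (by omega)]
      rw [← List.getElem_tail hfl]
      exact List.contains_iff_mem.mp (List.findIdx_getElem (w := hfl))
    · intro j hj hjpos hmem
      have hjt : j - 1 < l.tail.length := by omega
      have hcontra := List.not_of_lt_findIdx (p := (pvSepChars.contains ·)) (xs := l.tail)
        (i := j - 1) (by omega)
      rw [List.getElem_tail, pvGetElem_idx l (j - 1 + 1) j (by omega) (by omega)] at hcontra
      rw [← List.getD_eq_getElem l ' ' (by omega : j < l.length)] at hcontra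
      rw [List.contains_iff_mem.mpr hmem] at hcontra
      exact Bool.noConfusion hcontra
  · rintro ⟨h1, i, hir, hipos, hisep, himin, hieq, hnws⟩
    have hi : i < l.length := List.mem_range.mp hir
    have htl : l.tail.length = l.length - 1 := List.length_tail ..
    have hit : i - 1 < l.tail.length := by omega
    have hpi : (pvSepChars.contains (l.tail[i - 1]'hit)) = true := by
      rw [List.getElem_tail, pvGetElem_idx l (i - 1 + 1) i (by omega) (by omega)]
      rw [← List.getD_eq_getElem l ' ' hi]
      exact List.contains_iff_mem.mpr hisep
    have hany : l.tail.any (pvSepChars.contains ·) = true :=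
      List.any_eq_true.mpr ⟨_, List.getElem_mem hit, hpi⟩
    have hf : l.tail.findIdx (pvSepChars.contains ·) = i - 1 := by
      have hfl : l.tail.findIdx (pvSepChars.contains ·) < l.tail.length :=
        List.findIdx_lt_length.mpr (List.any_eq_true.mp hany)
      have hle : l.tail.findIdx (pvSepChars.contains ·) ≤ i - 1 := by
        by_contra hgt
        have hcontra : pvSepChars.contains (l.tail[i - 1]'hit) = false :=
          List.not_of_lt_findIdx (p := (pvSepChars.contains ·)) (xs := l.tail)
            (i := i - 1) (by omega)
        rw [hpi] at hcontra
        exact Bool.noConfusion hcontra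
      rcases Nat.lt_or_ge (l.tail.findIdx (pvSepChars.contains ·)) (i - 1) with hlt | hge
      · exfalso
        have hp := List.findIdx_getElem (p := (pvSepChars.contains ·)) (xs := l.tail) (w := hfl)
        rw [List.getElem_tail] at hp
        apply himin (l.tail.findIdx (pvSepChars.contains ·) + 1) (by omega) (by omega)
        rw [List.getD_eq_getElem l ' ' (by omega)]
        exact List.contains_iff_mem.mp hp
      · omega
    rw [hf]
    exact ⟨h1, hany, by rw [show 1 + (i - 1) = i by omega]; exact hieq,
      by rw [show 2 + (i - 1) = i + 1 by omega]; exact hnws⟩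

-- a valid (strictly positive) find() result names a separator occurrence in u at or after k
theorem pvPos_valid (u : List Char) (k : Nat) (hk : k ≤ u.length) (c : Char)
    (hpos : 0 < PySem.Chars.findFrom u [c] (k : Int)) :
    ∃ m : Nat, PySem.Chars.findFrom u [c] (k : Int) = (m : Int) ∧ k ≤ m ∧ 0 < m ∧
      ∃ hm : m < u.length, u[m] = c := by
  rw [pvPos_char u k hk c] at hpos ⊢
  cases hfi : (u.drop k).findIdx? (· == c) with
  | none => rw [hfi] at hpos; simp at hpos
  | some j =>
    rw [hfi] at hpos
    simp only at hpos ⊢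
    obtain ⟨hjl, hbeq, -⟩ := List.findIdx?_eq_some_iff_getElem.mp hfi
    rw [List.length_drop] at hjl
    refine ⟨k + j, rfl, by omega, by exact_mod_cast hpos, by omega, ?_⟩
    have := List.getElem_drop (xs := u) (i := k) (j := j)
      (h := by rw [List.length_drop]; omega)
    rw [this] at hbeq
    exact beq_iff_eq.mp hbeq

theorem pvA_red (um cp : String)
    (hs : PySem.Chars.startswith (PySem.Chars.lower um.toList) (PySem.Chars.lower cp.toList) = true) :
    extract_command_and_text um cp =
      (if (pvPack um.toList (pvM um.toList ((cp.toList.length : Nat) : Int) pvSeps ((um.toList.length : Nat) : Int))).2 = [] then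
         (cp, String.ofList (PySem.Chars.strip (um.toList.drop cp.toList.length)))
       else
         (String.ofList (pvPack um.toList (pvM um.toList ((cp.toList.length : Nat) : Int) pvSeps ((um.toList.length : Nat) : Int))).1,
          String.ofList (pvPack um.toList (pvM um.toList ((cp.toList.length : Nat) : Int) pvSeps ((um.toList.length : Nat) : Int))).2)) := by
  unfold extract_command_and_text
  rw [if_neg (by simpa using hs)]
  dsimp only
  rw [show ((um.toList.length : Int), um.toList, ([] : List Char))
        = ((um.toList.length : Int), pvPack um.toList (um.toList.length : Int)) by
      simp [pvPack]]
  rw [show ([[':'], ['.'], [','], ['-'], [';'], ['\n']] : List (List Char)) = pvSeps from rfl]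
  rw [pvFold_pack um.toList ((cp.toList.length : Nat) : Int) pvSeps _ le_rfl]
  rw [PySem.Chars.slice_eq_listSlice, PySem.List.slice_from_natCast]

theorem pvB_red (um cp : String)
    (hs : PySem.Chars.startswith (PySem.Chars.lower um.toList) (PySem.Chars.lower cp.toList) = true) :
    extract_command_and_text_alt um cp =
      (let res : List Char × List Char :=
         match pvScanSep (um.toList.drop cp.toList.length) cp.toList.length with
         | some i => (um.toList.take (i + 1), PySem.Chars.strip (um.toList.drop (i + 1)))
         | none => (um.toList, [])
       if res.2 = [] then
         (cp, String.ofList (PySem.Chars.strip (um.toList.drop cp.toList.length)))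
       else (String.ofList res.1, String.ofList res.2)) := by
  unfold extract_command_and_text_alt
  rw [if_neg (by simpa using hs)]

theorem pvMain (um cp : String) (hD : ¬ D_extract_command_and_text um cp) :
    extract_command_and_text um cp = extract_command_and_text_alt um cp := by
  by_cases hs : PySem.Chars.startswith (PySem.Chars.lower um.toList) (PySem.Chars.lower cp.toList) = true
  case neg =>
    unfold extract_command_and_text extract_command_and_text_alt
    rw [if_pos (by simpa using hs), if_pos (by simpa using hs)]
  case pos =>
  have hk : cp.toList.length ≤ um.toList.length := by
    have h1 := ((PySem.Chars.startswith_iff _ _).mp hs).length_le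
    simpa [PySem.Chars.lower] using h1
  rw [pvA_red um cp hs, pvB_red um cp hs]
  set u := um.toList with hu
  set k := cp.toList.length with hkdef
  have hQvalid : ∀ sep ∈ pvSeps, 0 < PySem.Chars.findFrom u sep (k : Int) →
      ∃ c m, sep = [c] ∧ pvIsSep c = true ∧
        PySem.Chars.findFrom u sep (k : Int) = ((m : Nat) : Int) ∧ k ≤ m ∧ 0 < m ∧
        ∃ hm : m < u.length, u[m] = c := by
    intro sep hsep hpos
    obtain ⟨c, rfl, hc⟩ := pvSeps_mem hsep
    obtain ⟨m, he, h1, h2, hm, h3⟩ := pvPos_valid u k hk c hpos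
    exact ⟨c, m, rfl, hc, he, h1, h2, hm, h3⟩
  cases hscan : pvScanSep (u.drop k) k with
  | none =>
    have hns := pvScanSep_none (u.drop k) k hscan
    have hMn : pvM u (k : Int) pvSeps (u.length : Int) = (u.length : Int) := by
      rcases pvM_cases u (k : Int) pvSeps (u.length : Int) with h | ⟨sep, hsep, he, hpos⟩
      · exact h
      · exfalso
        rw [he] at hpos
        obtain ⟨c, m, rfl, hc, hem, h1, h2, hm, h3⟩ := hQvalid _ hsep hpos
        have hj : m - k < (u.drop k).length := by rw [List.length_drop]; omega
        have hcontra := hns (m - k) hj (by omega)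
        rw [List.getElem_drop] at hcontra
        rw [pvGetElem_idx u (k + (m - k)) m (by omega)] at hcontra
        rw [h3] at hcontra
        simp [hc] at hcontra
    rw [hMn]
    simp [pvPack]
  | some r =>
    obtain ⟨j, hj, hr, hrpos, hsepj, hmin⟩ := pvScanSep_some (u.drop k) k r hscan
    have hjn : j < u.length - k := by rwa [List.length_drop] at hj
    have hru : r < u.length := by omega
    have hur : pvIsSep (u[r]'hru) = true := by
      have h5 := hsepj
      rw [List.getElem_drop] at h5
      rw [pvGetElem_idx u (k + j) r (by omega)] at h5
      exact h5
    have hminU : ∀ m, k ≤ m → m < r → 0 < m → ∀ hm : m < u.length, pvIsSep u[m] = false := by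
      intro m h1 h2 h3 hm
      have hj' : m - k < (u.drop k).length := by rw [List.length_drop]; omega
      have h5 := hmin (m - k) hj' (by omega) (by omega)
      rw [List.getElem_drop] at h5
      rw [pvGetElem_idx u (k + (m - k)) m (by omega)] at h5
      exact h5
    have hex : (u.drop k).findIdx? (· == u[r]'hru) ≠ none := by
      intro hnone
      rw [List.findIdx?_eq_none_iff] at hnone
      have hcontra := hnone ((u.drop k)[j]'hj) (List.getElem_mem _)
      rw [List.getElem_drop] at hcontra
      rw [pvGetElem_idx u (k + j) r (by omega)] at hcontra
      simp at hcontra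
    obtain ⟨jstar, hjs⟩ := Option.ne_none_iff_exists'.mp hex
    obtain ⟨hjsl, hjsbeq, hjsmin⟩ := List.findIdx?_eq_some_iff_getElem.mp hjs
    have hjsle : jstar ≤ j := by
      by_contra hlt
      have hcontra := hjsmin j (by omega)
      rw [List.getElem_drop] at hcontra
      rw [pvGetElem_idx u (k + j) r (by omega)] at hcontra
      simp at hcontra
    have hjsu : k + jstar < u.length := by rw [List.length_drop] at hjsl; omega
    have hposc : PySem.Chars.findFrom u [u[r]'hru] (k : Int) = ((k + jstar : Nat) : Int) := by
      rw [pvPos_char u k hk, hjs]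
    have hcjs : u[k + jstar]'hjsu = u[r]'hru := by
      have h5 := hjsbeq
      rw [List.getElem_drop] at h5
      exact beq_iff_eq.mp h5
    by_cases hq : 0 < k + jstar
    · have hkr : k + jstar = r := by
        by_contra hne
        have hlt : k + jstar < r := by omega
        have hcontra := hminU (k + jstar) (by omega) hlt (by omega) hjsu
        rw [hcjs] at hcontra
        simp [hur] at hcontra
      have hMr : pvM u (k : Int) pvSeps (u.length : Int) = ((r : Nat) : Int) := by
        have hle : pvM u (k : Int) pvSeps (u.length : Int) ≤ ((r : Nat) : Int) := by
          have h5 := pvM_le_pos u (k : Int) pvSeps (u.length : Int) [u[r]'hru]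
            (pvSeps_of_isSep hur) (by rw [hposc]; exact_mod_cast hq)
          rwa [hposc, hkr] at h5
        rcases pvM_cases u (k : Int) pvSeps (u.length : Int) with h | ⟨sep, hsep, he, hpos⟩
        · rw [h] at hle ⊢; omega
        · rw [he] at hpos ⊢
          obtain ⟨c, m, rfl, hc, hem, h1, h2, hm, h3⟩ := hQvalid _ hsep hpos
          rw [he, hem] at hle
          rw [hem]
          have hrm : r ≤ m := by
            by_contra hmr
            have hcontra := hminU m h1 (by omega) h2 hm
            rw [h3] at hcontra
            simp [hc] at hcontra
          have hmrEq : m = r := by omega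
          rw [hmrEq]
      rw [hMr]
      have hrn : ((r : Nat) : Int) ≠ ((u.length : Nat) : Int) := by
        intro hEq; omega
      have hpk : pvPack u ((r : Nat) : Int) = (u.take (r + 1), PySem.Chars.strip (u.drop (r + 1))) := by
        rw [pvPack, if_neg hrn]
        rw [show ((r : Nat) : Int) + 1 = (((r + 1 : Nat)) : Int) by push_cast; ring]
        rw [PySem.Chars.slice_eq_listSlice, PySem.Chars.slice_eq_listSlice,
            PySem.List.slice_to_natCast, PySem.List.slice_from_natCast]
      rw [hpk]
    · have hk0 : k = 0 := by omega
      have hu0 : u[0]'(by omega) = u[r]'hru := by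
        rw [← pvGetElem_idx u (k + jstar) 0 (by omega) hjsu]
        exact hcjs
      have hall : (u.drop (r + 1)).all PySem.Chars.isspace = true := by
        by_contra hfalse
        apply hD
        rw [pvD_iff]
        rw [← hu]
        constructor
        · rw [hkdef] at hk0
          exact List.length_eq_zero_iff.mp hk0
        · refine ⟨r, List.mem_range.mpr hru, by omega, ?_, ?_, ?_, by simpa using hfalse⟩
          · rw [List.getD_eq_getElem _ _ hru]; exact (pvIsSep_iff_mem _).mp hur
          · intro j' hj' hpos'
            rw [List.getD_eq_getElem _ _ (by omega)]
            intro hmem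
            have h7 := (pvIsSep_iff_mem _).mpr hmem
            rw [hminU j' (by omega) hj' hpos' _] at h7
            exact Bool.noConfusion h7
          · rw [List.getD_eq_getElem _ _ hru, List.getD_eq_getElem _ _ (by omega)]
            exact hu0.symm
      have hstripnil : PySem.Chars.strip (u.drop (r + 1)) = [] :=
        (pvStrip_eq_nil_iff _).mpr (by simpa [List.all_eq_true] using hall)
      have hAnil : (pvPack u (pvM u (k : Int) pvSeps (u.length : Int))).2 = [] := by
        rcases pvM_cases u (k : Int) pvSeps (u.length : Int) with h | ⟨sep, hsep, he, hpos⟩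
        · rw [h]; simp [pvPack]
        · rw [he] at hpos ⊢
          obtain ⟨c, m, rfl, hc, hem, h1, h2, hm, h3⟩ := hQvalid _ hsep hpos
          rw [hem]
          have hrm : r ≤ m := by
            by_contra hmr
            have hcontra := hminU m h1 (by omega) h2 hm
            rw [h3] at hcontra
            simp [hc] at hcontra
          have hmr' : r ≠ m := by
            intro hEq
            have hcr : c = u[r]'hru := by
              rw [← h3]
              exact (pvGetElem_idx u r m hEq hru).symm
            rw [hcr, hposc] at hem
            omega
          have hne : ((m : Nat) : Int) ≠ ((u.length : Nat) : Int) := by intro hEq; omega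
          rw [pvPack, if_neg hne]
          simp only
          rw [show ((m : Nat) : Int) + 1 = (((m + 1 : Nat)) : Int) by push_cast; ring]
          rw [PySem.Chars.slice_eq_listSlice, PySem.List.slice_from_natCast]
          rw [pvStrip_eq_nil_iff]
          intro ch hch
          have hsub : ch ∈ u.drop (r + 1) := by
            have hdd : u.drop (m + 1) = List.drop ((m + 1) - (r + 1)) (u.drop (r + 1)) := by
              rw [List.drop_drop]; congr 1; omega
            rw [hdd] at hch
            exact List.drop_subset _ _ hch
          exact (pvStrip_eq_nil_iff _).mp hstripnil ch hsub
      rw [if_pos hAnil]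
      simp [hstripnil]

theorem extract_command_and_text_spec : Claim_unchanged_extract_command_and_text := by
  intro um cp _ hD
  exact pvMain um cp hD

-- ===== VERDICT (by name: the statement is the Claim_ definition above) =====
set_option maxRecDepth 4096 in
theorem extract_command_and_text_changed : Claim_changed_extract_command_and_text := by
  unfold Claim_changed_extract_command_and_text; decide

theorem extract_command_and_text_tight : Claim_exact_extract_command_and_text := by
  intro um cp _ hDh
  obtain ⟨hcp, i, hirange, hipos, hisep, himin, hieq, hinws⟩ := (pvD_iff um cp).mp hDh
  set u := um.toList with hu
  have hi : i < u.length := List.mem_range.mp hirange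
  have hs : PySem.Chars.startswith (PySem.Chars.lower u) (PySem.Chars.lower cp.toList) = true := by
    rw [hcp]
    rw [PySem.Chars.startswith_iff]
    simp [PySem.Chars.lower]
  have hk0 : cp.toList.length = 0 := by rw [hcp]; rfl
  rw [pvA_red um cp hs, pvB_red um cp hs]
  rw [← hu]
  rw [hk0]
  simp only [List.drop_zero, Nat.cast_zero]
  -- D_'s data, in getElem form
  have hisep' : pvIsSep (u[i]'hi) = true := by
    rw [← List.getD_eq_getElem u ' ' hi]; exact (pvIsSep_iff_mem _).mpr hisep
  have himin' : ∀ j', j' < i → 0 < j' → ∀ hj' : j' < u.length, pvIsSep u[j'] = false := by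
    intro j' h1 h2 hj'
    by_cases hb : pvIsSep u[j'] = true
    · exfalso
      apply himin j' h1 h2
      rw [List.getD_eq_getElem u ' ' hj']
      exact (pvIsSep_iff_mem _).mp hb
    · exact Bool.eq_false_iff.mpr hb
  have hieq' : u[i]'hi = u[0]'(by omega) := by
    rw [← List.getD_eq_getElem u ' ' hi, ← List.getD_eq_getElem u ' ' (show 0 < u.length by omega)]
    exact hieq
  -- B's scan stops exactly at i
  have hscan : pvScanSep u 0 = some i := by
    have := pvScanSep_complete u 0 i hi (by omega) hisep'
      (fun j' hj' hlt hp => himin' j' hlt (by omega) hj')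
    simpa using this
  rw [hscan]
  dsimp only
  -- B's text is non-empty
  have hBne : PySem.Chars.strip (u.drop (i + 1)) ≠ [] := by
    intro hnil
    have h5 := (pvStrip_eq_nil_iff _).mp hnil
    have h6 : (u.drop (i + 1)).all PySem.Chars.isspace = true := List.all_eq_true.mpr h5
    rw [h6] at hinws
    exact Bool.noConfusion hinws
  rw [if_neg hBne]
  -- A's find() for the character u[i] lands at index 0 and is discarded
  have hfix : u.findIdx? (· == u[i]'hi) = some 0 := by
    rw [List.findIdx?_eq_some_iff_getElem]
    exact ⟨by omega, by rw [← hieq']; simp, by omega⟩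
  have hposc : PySem.Chars.findFrom u [u[i]'hi] (0 : Int) = (0 : Int) := by
    have h5 := pvPos_char u 0 (by omega) (u[i]'hi)
    rw [List.drop_zero, hfix] at h5
    simpa using h5
  -- whichever value A's min-fold takes, its output differs from B's
  have hQvalid : ∀ sep ∈ pvSeps, 0 < PySem.Chars.findFrom u sep (0 : Int) →
      ∃ c m, sep = [c] ∧ pvIsSep c = true ∧
        PySem.Chars.findFrom u sep (0 : Int) = ((m : Nat) : Int) ∧ 0 < m ∧
        ∃ hm : m < u.length, u[m] = c := by
    intro sep hsep hpos
    obtain ⟨c, rfl, hc⟩ := pvSeps_mem hsep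
    obtain ⟨m, he, h1, h2, hm, h3⟩ := pvPos_valid u 0 (by omega) c (by simpa using hpos)
    exact ⟨c, m, rfl, hc, by simpa using he, h2, hm, h3⟩
  have hfirstne : ∀ (t1 t2 : List Char), (cp, String.ofList t1) ≠
      (String.ofList (u.take (i + 1)), String.ofList t2) := by
    intro t1 t2 hEq
    have h5 : cp.toList = (String.ofList (u.take (i + 1))).toList :=
      congrArg (fun q => Prod.fst q |>.toList) hEq
    rw [hcp, String.toList_ofList] at h5
    have h6 : (u.take (i + 1)).length = 0 := by rw [← h5]; rfl
    rw [List.length_take] at h6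
    omega
  rcases pvM_cases u (0 : Int) pvSeps ((u.length : Nat) : Int) with h | ⟨sep, hsep, he, hpos⟩
  · rw [h]
    rw [show pvPack u ((u.length : Nat) : Int) = (u, ([] : List Char)) by simp [pvPack]]
    rw [if_pos (show ((u, ([] : List Char)) : List Char × List Char).2 = [] from rfl)]
    intro hEq
    exact hfirstne _ _ hEq
  · rw [he] at hpos ⊢
    obtain ⟨c, m, rfl, hc, hem, h2, hm, h3⟩ := hQvalid _ hsep hpos
    rw [hem]
    have hmi : i < m := by
      rcases Nat.lt_trichotomy m i with hlt | hEq | hgt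
      · exfalso
        have hcontra := himin' m hlt h2 hm
        rw [h3] at hcontra
        simp [hc] at hcontra
      · exfalso
        have hcr : c = u[i]'hi := by
          rw [← h3]
          exact (pvGetElem_idx u i m hEq.symm hi).symm
        rw [hcr, hposc] at hem
        omega
      · exact hgt
    have hne : ((m : Nat) : Int) ≠ ((u.length : Nat) : Int) := by intro hEq; omega
    rw [pvPack, if_neg hne]
    simp only
    rw [show ((m : Nat) : Int) + 1 = (((m + 1 : Nat)) : Int) by push_cast; ring]
    rw [PySem.Chars.slice_eq_listSlice, PySem.Chars.slice_eq_listSlice,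
        PySem.List.slice_to_natCast, PySem.List.slice_from_natCast]
    by_cases hnil : PySem.Chars.strip (u.drop (m + 1)) = []
    · rw [if_pos hnil]
      intro hEq
      exact hfirstne _ _ hEq
    · rw [if_neg hnil]
      intro hEq
      have h5 := congrArg (fun q => q.1.toList.length) hEq
      simp only [String.toList_ofList, List.length_take] at h5
      omega
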